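-- pv_equiv track=rewrite | github.com/moguno/scroll_phat_hd-japanese-ticker | bin/misaki.py | fontx_to_scrollphathd
-- ===== SOURCE A (Python) =====
-- def fontx_to_scrollphathd(fontx):
-- 	result = [None] * 7
--
-- 	for line in range(7):
-- 		target = [0x00] * 8
-- 		result[line] = target
--
-- 		for bit in range(8):
-- 			if ((fontx[line] >> bit) & 0x01) != 0x00:
-- 				target[7 - bit] = 0xff
--
-- 	return result
-- ===== SOURCE B (Python) =====
-- def fontx_to_scrollphathd(fontx):
-- 	return [[0xff if c == '1' else 0x00 for c in format(fontx[line] & 0xFF, '08b')]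
-- 	        for line in range(7)]
-- ===== Notes on version B (the rewrite author's own statement) =====
-- stated objective: idiomatic
-- what changed: B replaces A's preallocate-and-mutate loop (LSB-first bit tests writing into target[7-bit]) with a comprehension that formats each byte as its MSB-first 8-char binary string via format(v & 0xFF, '08b') and maps '1'/'0' directly to 0xff/0x00.
import Mathlib
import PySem

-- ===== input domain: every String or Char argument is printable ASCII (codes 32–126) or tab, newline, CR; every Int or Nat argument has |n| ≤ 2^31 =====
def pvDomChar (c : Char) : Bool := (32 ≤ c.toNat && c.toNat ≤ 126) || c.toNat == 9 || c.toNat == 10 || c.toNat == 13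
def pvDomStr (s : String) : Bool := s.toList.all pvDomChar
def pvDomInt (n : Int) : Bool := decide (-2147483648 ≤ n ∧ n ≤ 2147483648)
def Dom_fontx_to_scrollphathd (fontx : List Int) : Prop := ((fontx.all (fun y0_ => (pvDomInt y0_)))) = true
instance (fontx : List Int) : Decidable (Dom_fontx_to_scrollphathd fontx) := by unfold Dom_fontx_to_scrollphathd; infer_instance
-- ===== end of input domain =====

-- B re-codes each row as bit-to-pixel mapping over the 8-char binary string format(v & 0xFF, '08b')
-- (MSB-first, so no index reversal), instead of A's mutation of a preallocated row LSB-first; objective: idiomatic.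

-- ===== PORT A =====
def fontx_to_scrollphathd (fontx : List Int) : List (List Int) :=
  -- result = [None]*7; for line in range(7): result[line] = target (built by the inner loop)
  (PySem.List.pyRange 0 7 1).foldl
    (fun result line =>
      result ++ [ (PySem.List.pyRange 0 8 1).foldl
        (fun target bit =>
          -- if ((fontx[line] >> bit) & 0x01) != 0x00: target[7 - bit] = 0xff
          if PySem.Int.band (PySem.List.pyGetD fontx line 0 >>> bit.toNat) 1 ≠ 0 then
            PySem.List.pySetD target (7 - bit) 0xff
          else target)
        (List.replicate 8 0) ]) []

-- ===== PORT B =====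
-- format(m, '08b') for 0 ≤ m < 256: the 8 binary digits of m, most significant first
def pvBin8 (m : Int) : List Char :=
  (List.range 8).map (fun i => if PySem.Int.floordiv m (2 ^ (7 - i)) % 2 = 1 then '1' else '0')

def fontx_to_scrollphathd_alt (fontx : List Int) : List (List Int) :=
  (PySem.List.pyRange 0 7 1).map (fun line =>
    (pvBin8 (PySem.Int.band (PySem.List.pyGetD fontx line 0) 0xFF)).map
      (fun c => if c = '1' then (0xff : Int) else 0x00))

-- ===== PRECONDITION & SPEC =====
-- A does fontx[line] for line in range(7): IndexError (for both A and B) unless fontx has ≥ 7 elements.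
def Pre_fontx_to_scrollphathd (fontx : List Int) : Prop := 7 ≤ fontx.length
instance (fontx : List Int) : Decidable (Pre_fontx_to_scrollphathd fontx) := by unfold Pre_fontx_to_scrollphathd; infer_instance
def pvWitness_fontx_to_scrollphathd : List Int := [0, 1, 2, 3, 4, 5, 6]

def Spec_fontx_to_scrollphathd (fontx : List Int) (out : List (List Int)) : Prop := out = fontx_to_scrollphathd_alt fontx
instance (fontx : List Int) (out : List (List Int)) : Decidable (Spec_fontx_to_scrollphathd fontx out) := by unfold Spec_fontx_to_scrollphathd; infer_instance

-- ===== CLAIM (what is proved, stated in full; the proofs are below) =====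
def Claim_equal_fontx_to_scrollphathd : Prop := ∀ (fontx : List Int), Dom_fontx_to_scrollphathd fontx → Pre_fontx_to_scrollphathd fontx → Spec_fontx_to_scrollphathd fontx (fontx_to_scrollphathd fontx)

-- ===== LEMMAS AND PROOFS =====

-- Python's v & 0xFF is the floor-remainder v % 256 (also for negative v).
theorem pv_band255 (v : Int) : PySem.Int.band v 255 = v % 256 := by
  rw [← PySem.Int.mod_eq_emod_of_pos (by norm_num : (0:Int) < 256)]
  simp only [PySem.Int.band, PySem.Int.mod]
  have h255 : (255:Int).toNat = 255 := rfl
  rw [h255]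
  norm_num
  split_ifs with h
  · have h1 : v.toNat &&& 255 = v.toNat % 256 := by
      have := Nat.and_two_pow_sub_one_eq_mod v.toNat 8; norm_num at this; exact this
    rw [h1, Int.fmod_eq_emod]
    simp; omega
  · have h1 : 255 &&& ((-v).toNat - 1) = ((-v).toNat - 1) % 256 := by
      rw [Nat.and_comm]
      have := Nat.and_two_pow_sub_one_eq_mod ((-v).toNat - 1) 8; norm_num at this
      exact this
    rw [h1, Int.fmod_eq_emod]
    simp; omega

set_option maxHeartbeats 1000000 in
theorem pv_row_eq (v : Int) :
    (PySem.List.pyRange 0 8 1).foldl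
      (fun target bit =>
        if PySem.Int.band (v >>> bit.toNat) 1 ≠ 0 then
          PySem.List.pySetD target (7 - bit) 0xff
        else target)
      (List.replicate 8 0)
    = (pvBin8 (PySem.Int.band v 0xFF)).map (fun c => if c = '1' then (0xff : Int) else 0x00) := by
  -- a bit k < 8 of v is the same bit of v % 256
  have key : ∀ (k : ℕ), k < 8 → v / ((2:ℤ)^k) % 2 = (v % 256) / ((2:ℤ)^k) % 2 := by
    intro k hk
    obtain ⟨j, hj⟩ : ∃ j, 8 = k + (j+1) := ⟨7 - k, by omega⟩
    have h256 : (256:ℤ) = 2^k * 2^(j+1) := by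
      rw [← pow_add, ← hj]; norm_num
    have hpow : ((2:ℤ)^k) ≠ 0 := by positivity
    have hv : v % 256 = v + (-(2^(j+1) * (v / 256))) * 2^k := by
      rw [Int.emod_def, h256]; ring
    rw [hv, Int.add_mul_ediv_right _ _ hpow]
    have h2 : (-((2:ℤ)^(j+1) * (v / 256))) = 2 * (-(2^j * (v/256))) := by
      rw [pow_succ]; ring
    rw [h2]
    omega
  rw [pv_band255]
  refine Eq.trans (PySem.List.foldl_congr_mem _ _
      (fun target bit =>
        if PySem.Int.band ((v % 256) >>> ((bit.toNat : Int))) 1 ≠ 0 then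
          PySem.List.pySetD target (7 - bit) (0xff : Int)
        else target) _ ?_) ?_
  · intro acc bit hb
    rw [PySem.List.mem_pyRange_one] at hb
    have hk : bit.toNat < 8 := by omega
    have hcond : PySem.Int.band (v >>> ((bit.toNat : Int))) 1
        = PySem.Int.band ((v % 256) >>> ((bit.toNat : Int))) 1 := by
      rw [PySem.Int.band_one, PySem.Int.band_one,
        Int.shiftRight_natCast_right, Int.shiftRight_natCast_right,
        Int.shiftRight_eq_div_pow, Int.shiftRight_eq_div_pow,
        PySem.Int.mod_eq_emod_of_pos (by norm_num : (0:Int) < 2),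
        PySem.Int.mod_eq_emod_of_pos (by norm_num : (0:Int) < 2)]
      push_cast
      exact key bit.toNat hk
    rw [hcond]
  · have h0 : 0 ≤ v % 256 := Int.emod_nonneg v (by norm_num)
    have h1 : v % 256 < 256 := Int.emod_lt_of_pos v (by norm_num)
    generalize v % 256 = m at h0 h1 ⊢
    interval_cases m <;> decide

theorem fontx_to_scrollphathd_spec_aux (fontx : List Int) :
    fontx_to_scrollphathd fontx = fontx_to_scrollphathd_alt fontx := by
  unfold fontx_to_scrollphathd fontx_to_scrollphathd_alt
  rw [PySem.List.foldl_append_singleton_eq_map]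
  exact List.map_congr_left (fun line _ => pv_row_eq (PySem.List.pyGetD fontx line 0))

-- ===== VERDICT (by name: the statement is the Claim_ definition above) =====
theorem fontx_to_scrollphathd_spec : Claim_equal_fontx_to_scrollphathd := by
  intro fontx _ _
  unfold Spec_fontx_to_scrollphathd
  exact fontx_to_scrollphathd_spec_aux fontx
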